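-- pv_equiv track=rewrite | github.com/lge0322/F2021_public | 15112-F21/Midterm1_Prep/hw3 (1).py | topScorer
-- ===== SOURCE A (Python) =====
-- def topScorer(data):
--     bestScore = -1
--     bestName = None
--     for line in data.splitlines():
--         currentScore =0
--         currentName = ""
--         for word in line.split(","):
--             if word.isdigit():
--                 currentScore += int(word)
--             else:
--                 currentName += word
--         if (currentScore > bestScore):
--             bestName = currentName
--             bestScore = currentScore
--         elif (currentScore == bestScore):
--             bestName = bestName + "," + currentName
--     return bestName
-- ===== SOURCE B (Python) =====
-- def topScorer(data):
--     rows = [(sum(int(w) for w in line.split(",") if w.isdigit()),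
--              "".join(w for w in line.split(",") if not w.isdigit()))
--             for line in data.splitlines()]
--     if not rows:
--         return None
--     best = max(s for s, _ in rows)
--     return ",".join(n for s, n in rows if s == best)
-- ===== Notes on version B (the rewrite author's own statement) =====
-- stated objective: simpler
-- what changed: A's single-pass running-best tracking with a -1 sentinel and string re-concatenation of the best name is replaced by a build-table-then-scan decomposition: compute all (score, name) rows, take the max score, and join the names of the max-score rows.
import Mathlib
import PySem

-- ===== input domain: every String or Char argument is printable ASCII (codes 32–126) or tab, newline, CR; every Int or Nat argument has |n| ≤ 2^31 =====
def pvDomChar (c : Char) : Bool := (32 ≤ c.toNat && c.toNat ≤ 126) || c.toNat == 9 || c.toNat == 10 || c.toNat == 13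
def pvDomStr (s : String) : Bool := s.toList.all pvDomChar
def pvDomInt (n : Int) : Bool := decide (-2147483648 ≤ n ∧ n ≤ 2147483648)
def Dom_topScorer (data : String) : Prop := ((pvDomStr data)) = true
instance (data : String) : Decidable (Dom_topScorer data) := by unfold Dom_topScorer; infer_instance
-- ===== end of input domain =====

-- B replaces A's single-pass running-best tracking (with -1 sentinel) by a build-(score,name)-table-then-scan
-- decomposition: objective 'simpler'; return values proved equal on every input.

-- ===== PORT A =====
-- per-line accumulation: currentScore/currentName over line.split(",")
def pvLineA (line : List Char) : Int × List Char :=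
  ((PySem.Chars.split? line [',']).getD []).foldl
    (fun p w =>
      if PySem.Chars.strIsdigit w then (p.1 + (PySem.Int.ofChars? w).getD 0, p.2)
      else (p.1, p.2 ++ w))
    (0, [])

-- the outer for-loop over splitlines carrying (bestScore, bestName);
-- 'bn.getD []' marks Python's 'bestName + ","' in the equal branch: with bn = none Python would raise
-- TypeError, but that state is unreachable (line scores are ≥ 0, so the first line always takes the > branch)
def pvLoopA : List (List Char) → Int → Option (List Char) → Option (List Char)
  | [], _, bn => bn
  | line :: rest, bs, bn =>
      let c := pvLineA line
      if bs < c.1 then pvLoopA rest c.1 (some c.2)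
      else if c.1 = bs then pvLoopA rest bs (some (bn.getD [] ++ [','] ++ c.2))
      else pvLoopA rest bs bn

def topScorer (data : String) : Option String :=
  (pvLoopA (PySem.Chars.splitlines data.toList) (-1) none).map String.ofList

-- ===== PORT B =====
-- one row per line: (sum of the int words, "".join of the non-digit words)
def pvRowB (line : List Char) : Int × List Char :=
  (((((PySem.Chars.split? line [',']).getD []).filter (fun w => PySem.Chars.strIsdigit w)).map
      (fun w => (PySem.Int.ofChars? w).getD 0)).foldl (· + ·) 0,
   PySem.Chars.join [] (((PySem.Chars.split? line [',']).getD []).filter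
      (fun w => !PySem.Chars.strIsdigit w)))

def topScorer_alt (data : String) : Option String :=
  let rows := (PySem.Chars.splitlines data.toList).map pvRowB
  match PySem.List.max? (rows.map Prod.fst) (fun y => y) with
  | none => none
  | some best =>
      some (String.ofList
        (PySem.Chars.join [','] ((rows.filter (fun r => r.1 == best)).map Prod.snd)))

-- ===== PRECONDITION & SPEC =====
def Spec_topScorer (data : String) (out : Option String) : Prop := out = topScorer_alt data
instance (data : String) (out : Option String) : Decidable (Spec_topScorer data out) := by unfold Spec_topScorer; infer_instance

-- ===== CLAIM (what is proved, stated in full; the proofs are below) =====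
def Claim_equal_topScorer : Prop := ∀ (data : String), Dom_topScorer data → Spec_topScorer data (topScorer data)

-- ===== LEMMAS AND PROOFS =====

-- join with the empty separator is flatten
theorem pvJoin_nil_flatten (parts : List (List Char)) :
    PySem.Chars.join [] parts = parts.flatten := by
  induction parts with
  | nil => simp [PySem.Chars.join_nil]
  | cons p rest ih =>
      cases rest with
      | nil => simp [PySem.Chars.join_singleton]
      | cons q r => simp [PySem.Chars.join_cons_cons] at ih ⊢; simpa using ih

-- a separator already glued into the head can be pulled out as a list element
theorem pvJoin_glue (sep a b : List Char) (l : List (List Char)) :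
    PySem.Chars.join sep ((a ++ sep ++ b) :: l) = PySem.Chars.join sep (a :: b :: l) := by
  cases l with
  | nil => simp [PySem.Chars.join_singleton, PySem.Chars.join_cons_cons]
  | cons x r => simp [PySem.Chars.join_cons_cons]

theorem pvFoldl_shift (l : List Int) (a b : Int) :
    l.foldl (· + ·) (a + b) = b + l.foldl (· + ·) a := by
  induction l generalizing a with
  | nil => simp [add_comm]
  | cons x t ih => simp only [List.foldl_cons]; rw [show a + b + x = a + x + b by ring, ih]

-- per-line equality: B's row computation equals A's fold
theorem pvFoldA_split (ws : List (List Char)) (s : Int) (n : List Char) :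
    ws.foldl (fun p w =>
        if PySem.Chars.strIsdigit w then (p.1 + (PySem.Int.ofChars? w).getD 0, p.2)
        else (p.1, p.2 ++ w)) (s, n)
    = (s + ((ws.filter (fun w => PySem.Chars.strIsdigit w)).map
              (fun w => (PySem.Int.ofChars? w).getD 0)).foldl (· + ·) 0,
       n ++ ((ws.filter (fun w => !PySem.Chars.strIsdigit w)).flatten)) := by
  induction ws generalizing s n with
  | nil => simp
  | cons w rest ih =>
      by_cases h : PySem.Chars.strIsdigit w
      · simp only [List.foldl_cons, h, if_pos, List.filter_cons_of_pos, List.map_cons]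
        rw [ih, pvFoldl_shift]
        simp [h, add_assoc]
      · simp only [List.foldl_cons, h]
        rw [ih]
        simp [h]

theorem pvRow_eq (line : List Char) : pvLineA line = pvRowB line := by
  unfold pvLineA pvRowB
  rw [pvFoldA_split, pvJoin_nil_flatten]
  simp

-- an all-digit word parses to a nonnegative int (or fails, in which case getD 0 = 0)
theorem pvOfChars_digits_nonneg (w : List Char) (hw : PySem.Chars.strIsdigit w = true) :
    0 ≤ (PySem.Int.ofChars? w).getD 0 := by
  rcases hv : PySem.Int.ofChars? w with _ | v
  · simp
  · simp only [Option.getD_some]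
    unfold PySem.Int.ofChars? at hv
    have hmem : ∀ x ∈ (List.dropWhile PySem.Int.isIntSpace
        (List.dropWhile PySem.Int.isIntSpace w).reverse).reverse, x ∈ w := by
      intro x hx
      rw [List.mem_reverse] at hx
      have h1 : x ∈ (List.dropWhile PySem.Int.isIntSpace w).reverse :=
        (List.dropWhile_sublist _).subset hx
      rw [List.mem_reverse] at h1
      exact (List.dropWhile_sublist _).subset h1
    simp only [] at hv
    split at hv
    · rename_i ds heq
      exfalso
      have : '-' ∈ w := hmem '-' (by rw [heq]; exact List.mem_cons_self)
      have hall := (List.all_eq_true.mp (Bool.and_elim_right hw)) '-' this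
      simp [PySem.Chars.isdigit] at hall
    · simp only [Option.map_eq_some_iff] at hv
      obtain ⟨n, hn, rfl⟩ := hv
      simp only [Option.pure_def, Option.bind_eq_bind, Option.bind_eq_some_iff] at hn
      obtain ⟨a, _, ha⟩ := hn
      simp only [Option.some.injEq] at ha
      omega
    · simp only [Option.map_eq_some_iff] at hv
      obtain ⟨n, hn, rfl⟩ := hv
      simp only [Option.pure_def, Option.bind_eq_bind, Option.bind_eq_some_iff] at hn
      obtain ⟨a, _, ha⟩ := hn
      simp only [Option.some.injEq] at ha
      omega

theorem pvSum_nonneg (l : List Int) (h : ∀ x ∈ l, 0 ≤ x) : 0 ≤ l.foldl (· + ·) 0 := by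
  have gen : ∀ (l : List Int) (a : Int), 0 ≤ a → (∀ x ∈ l, 0 ≤ x) → 0 ≤ l.foldl (· + ·) a := by
    intro l
    induction l with
    | nil => intro a ha _; simpa using ha
    | cons x t ih =>
        intro a ha hl
        simp only [List.foldl_cons]
        exact ih _ (by have := hl x List.mem_cons_self; omega)
          (fun y hy => hl y (List.mem_cons_of_mem _ hy))
  exact gen l 0 le_rfl h

theorem pvLineA_nonneg (line : List Char) : 0 ≤ (pvLineA line).1 := by
  rw [pvRow_eq]
  unfold pvRowB
  apply pvSum_nonneg
  intro x hx
  simp only [List.mem_map, List.mem_filter] at hx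
  obtain ⟨w, ⟨_, hdig⟩, rfl⟩ := hx
  exact pvOfChars_digits_nonneg w hdig

-- the row-level version of A's loop
def pvLoopR : List (Int × List Char) → Int → Option (List Char) → Option (List Char)
  | [], _, bn => bn
  | c :: rest, bs, bn =>
      if bs < c.1 then pvLoopR rest c.1 (some c.2)
      else if c.1 = bs then pvLoopR rest bs (some (bn.getD [] ++ [','] ++ c.2))
      else pvLoopR rest bs bn

theorem pvLoopA_eq_R (lines : List (List Char)) (bs : Int) (bn : Option (List Char)) :
    pvLoopA lines bs bn = pvLoopR (lines.map pvLineA) bs bn := by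
  induction lines generalizing bs bn with
  | nil => rfl
  | cons l rest ih => simp only [pvLoopA, pvLoopR, List.map_cons]; split_ifs <;> apply ih

-- names of the rows achieving score m, in order
def pvSel (m : Int) (rows : List (Int × List Char)) : List (List Char) :=
  (rows.filter (fun r => r.1 == m)).map Prod.snd

-- what A's loop computes from a live state (bs, some n)
def pvG (rows : List (Int × List Char)) (bs : Int) (n : List Char) : List Char :=
  let m := (rows.map Prod.fst).foldl max bs
  if bs < m then PySem.Chars.join [','] (pvSel m rows)
  else PySem.Chars.join [','] (n :: pvSel bs rows)

theorem pvMax_le_foldl (b : Int) (l : List Int) : b ≤ l.foldl max b := by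
  induction l generalizing b with
  | nil => simp
  | cons x t ih => simp only [List.foldl_cons]; exact le_trans (le_max_left b x) (ih _)

-- one strict improvement step: the state after it computes the max-score names of r :: rest
theorem pvG_step (r : Int × List Char) (rest : List (Int × List Char)) :
    pvG rest r.1 r.2
      = PySem.Chars.join [','] (pvSel ((rest.map Prod.fst).foldl max r.1) (r :: rest)) := by
  unfold pvG pvSel
  set m := (rest.map Prod.fst).foldl max r.1 with hm
  have hle : r.1 ≤ m := pvMax_le_foldl _ _
  by_cases h : r.1 < m
  · simp only [if_pos h, List.filter_cons]
    have : (r.1 == m) = false := by simp; omega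
    simp [this]
  · have heq : m = r.1 := le_antisymm (by omega) hle
    simp only [List.filter_cons, heq]
    simp

theorem pvLoopR_g (rows : List (Int × List Char)) (bs : Int) (n : List Char) :
    pvLoopR rows bs (some n) = some (pvG rows bs n) := by
  induction rows generalizing bs n with
  | nil => simp [pvLoopR, pvG, pvSel, PySem.Chars.join_singleton]
  | cons r rest ih =>
      simp only [pvLoopR]
      by_cases h1 : bs < r.1
      · rw [if_pos h1, ih, pvG_step]
        unfold pvG
        have hm : ((r :: rest).map Prod.fst).foldl max bs
            = (rest.map Prod.fst).foldl max r.1 := by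
          simp only [List.map_cons, List.foldl_cons]
          congr 1
          omega
        rw [hm, if_pos (by have := pvMax_le_foldl r.1 (rest.map Prod.fst); omega)]
      · rw [if_neg h1]
        by_cases h2 : r.1 = bs
        · rw [if_pos h2, ih]
          unfold pvG
          have hm : ((r :: rest).map Prod.fst).foldl max bs
              = (rest.map Prod.fst).foldl max bs := by
            simp only [List.map_cons, List.foldl_cons]
            congr 1
            omega
          rw [hm]
          set m := (rest.map Prod.fst).foldl max bs with hmm
          by_cases h3 : bs < m
          · rw [if_pos h3, if_pos h3]
            unfold pvSel
            simp only [List.filter_cons]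
            have : (r.1 == m) = false := by simp; omega
            simp [this]
          · rw [if_neg h3, if_neg h3]
            unfold pvSel
            simp only [List.filter_cons]
            have : (r.1 == bs) = true := by simp [h2]
            simp only [this, if_pos, Option.getD_some, List.map_cons, Option.some.injEq]
            rw [pvJoin_glue]
        · rw [if_neg h2, ih]
          unfold pvG
          have hm : ((r :: rest).map Prod.fst).foldl max bs
              = (rest.map Prod.fst).foldl max bs := by
            simp only [List.map_cons, List.foldl_cons]
            congr 1
            omega
          rw [hm]
          have hsel : ∀ m', r.1 ≠ m' →
              pvSel m' (r :: rest) = pvSel m' rest := by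
            intro m' hne
            unfold pvSel
            simp only [List.filter_cons]
            have : (r.1 == m') = false := by simp [hne]
            simp [this]
          set m := (rest.map Prod.fst).foldl max bs with hmm
          have hlt : r.1 < bs := by omega
          have hbm : bs ≤ m := pvMax_le_foldl _ _
          by_cases h3 : bs < m
          · rw [if_pos h3, if_pos h3, hsel m (by omega)]
          · rw [if_neg h3, if_neg h3, hsel bs (by omega)]

-- ===== VERDICT (by name: the statement is the Claim_ definition above) =====
theorem topScorer_spec : Claim_equal_topScorer := by
  unfold Claim_equal_topScorer Spec_topScorer
  intro data _
  unfold topScorer topScorer_alt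
  rcases hls : PySem.Chars.splitlines data.toList with _ | ⟨l, ls⟩
  · simp [pvLoopA, PySem.List.max?]
  · have hrows : (l :: ls).map pvRowB = (l :: ls).map pvLineA := by
      simp only [List.map_inj_left]
      intro a _
      exact (pvRow_eq a).symm
    rw [pvLoopA_eq_R, hrows]
    simp only [List.map_cons, pvLoopR]
    have h0 : (-1 : Int) < (pvLineA l).1 := by have := pvLineA_nonneg l; omega
    rw [if_pos h0, pvLoopR_g, pvG_step]
    rw [PySem.List.max?_id_cons]
    simp only [Option.map_some, pvSel]
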